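-- pv_equiv track=rewrite | github.com/sukhpreet0607/HUSTLE | Competitive_coding/m1.py | overall_distortion
-- ===== SOURCE A (Python) =====
-- def overall_distortion(N, issue_counts):
--     overall_distortion_value = 0
--     prev = sum(issue_counts[0])
--
--     for hour in range(1, N):
--         curr = sum(issue_counts[hour])
--         if curr>prev:
--             overall_distortion_value += (curr - prev)
--         prev = curr
--     return overall_distortion_value
-- ===== SOURCE B (Python) =====
-- def overall_distortion(N, issue_counts):
--     totals = [sum(issue_counts[h]) for h in range(N)]
--     result = 0
--     i = 0
--     n = len(totals)
--     while i + 1 < n: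
--         while i + 1 < n and totals[i + 1] <= totals[i]:
--             i += 1  # slide down to a valley
--         valley = totals[i]
--         while i + 1 < n and totals[i + 1] >= totals[i]:
--             i += 1  # climb to the next peak
--         result += totals[i] - valley
--     return result
-- ===== Notes on version B (the rewrite author's own statement) =====
-- stated objective: alternative
-- what changed: Replaces A's per-pair positive-difference accumulation by a valley-to-peak scan: precompute the hourly totals, then repeatedly slide down to a local valley and climb to the next peak, adding peak minus valley (each increasing run telescopes).
import Mathlib
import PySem

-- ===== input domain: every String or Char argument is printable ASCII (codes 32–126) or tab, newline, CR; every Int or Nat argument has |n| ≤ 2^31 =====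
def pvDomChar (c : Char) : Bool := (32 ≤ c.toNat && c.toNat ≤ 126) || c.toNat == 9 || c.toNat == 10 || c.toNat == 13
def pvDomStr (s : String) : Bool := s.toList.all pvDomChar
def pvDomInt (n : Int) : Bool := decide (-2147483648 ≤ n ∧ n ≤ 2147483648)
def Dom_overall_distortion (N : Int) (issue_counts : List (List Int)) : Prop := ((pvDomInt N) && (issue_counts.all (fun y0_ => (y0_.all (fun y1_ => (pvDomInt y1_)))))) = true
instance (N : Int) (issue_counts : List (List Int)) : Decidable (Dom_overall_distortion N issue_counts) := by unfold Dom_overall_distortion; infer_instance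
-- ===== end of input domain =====

-- B replaces per-pair positive-difference accumulation by a valley-to-peak scan over the
-- precomputed hourly totals (each increasing run telescopes to peak − valley); same return value.

-- ===== PORT A =====
-- hourly total: sum(issue_counts[h]); under Pre_ every accessed index is in range, so getD [] is never taken
def pvTotal (issue_counts : List (List Int)) (h : Int) : Int :=
  ((PySem.List.pyGet? issue_counts h).getD []).sum

def overall_distortion (N : Int) (issue_counts : List (List Int)) : Int :=
  let prev0 := pvTotal issue_counts 0
  let r := (PySem.List.pyRange 1 N 1).foldl
    (fun (s : Int × Int) hour =>
      let curr := pvTotal issue_counts hour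
      (if curr > s.2 then s.1 + (curr - s.2) else s.1, curr))
    (0, prev0)
  r.1

-- ===== PORT B =====
-- inner while loop 'slide down to a valley': consume while next ≤ current; returns (valley, rest)
def pvDescend : Int → List Int → Int × List Int
  | cur, [] => (cur, [])
  | cur, h :: t => if h ≤ cur then pvDescend h t else (cur, h :: t)

-- inner while loop 'climb to the next peak': consume while next ≥ current; returns (peak, rest)
def pvAscend : Int → List Int → Int × List Int
  | cur, [] => (cur, [])
  | cur, h :: t => if cur ≤ h then pvAscend h t else (cur, h :: t)

theorem pvDescend_len : ∀ (cur : Int) (l : List Int), (pvDescend cur l).2.length ≤ l.length := by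
  intro cur l
  induction l generalizing cur with
  | nil => simp [pvDescend]
  | cons h t ih =>
    simp only [pvDescend]
    split_ifs
    · exact Nat.le_trans (ih h) (Nat.le_succ _)
    · simp

theorem pvAscend_len : ∀ (cur : Int) (l : List Int), (pvAscend cur l).2.length ≤ l.length := by
  intro cur l
  induction l generalizing cur with
  | nil => simp [pvAscend]
  | cons h t ih =>
    simp only [pvAscend]
    split_ifs
    · exact Nat.le_trans (ih h) (Nat.le_succ _)
    · simp

-- after a descend, the next element (if any) is strictly larger, so the ascend consumes it
theorem pvDescend_next : ∀ (cur : Int) (l : List Int) (h : Int) (t : List Int),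
    (pvDescend cur l).2 = h :: t → (pvDescend cur l).1 < h := by
  intro cur l
  induction l generalizing cur with
  | nil => intro h t hx; simp [pvDescend] at hx
  | cons a s ih =>
    intro h t hx
    by_cases hc : a ≤ cur
    · simp only [pvDescend, if_pos hc] at hx ⊢
      exact ih a h t hx
    · simp only [pvDescend, if_neg hc] at hx ⊢
      obtain ⟨rfl, -⟩ := List.cons_eq_cons.mp hx
      omega

-- outer while loop: one valley-to-peak round, then recurse on the remainder
def pvGo (cur : Int) (rest : List Int) : Int :=
  match rest with
  | [] => 0
  | h :: t =>
    let d := pvDescend cur (h :: t)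
    let a := pvAscend d.1 d.2
    (a.1 - d.1) + pvGo a.1 a.2
termination_by rest.length
decreasing_by
  · rcases hr : d.2 with _ | ⟨h1, t1⟩
    · simp [pvAscend]
    · have h1lt : d.1 < h1 := pvDescend_next cur (h :: t) h1 t1 hr
      have he : pvAscend d.1 (h1 :: t1) = pvAscend h1 t1 := by
        simp [pvAscend, le_of_lt h1lt]
      have h2 := pvAscend_len h1 t1
      have h3 := pvDescend_len cur (h :: t)
      rw [hr] at h3
      simp only [d, hr, he] at *
      simp only [List.length_cons] at *
      omega

def overall_distortion_alt (N : Int) (issue_counts : List (List Int)) : Int :=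
  let totals := (PySem.List.pyRange 0 N 1).map (pvTotal issue_counts)
  match totals with
  | [] => 0
  | h :: t => pvGo h t

-- ===== PRECONDITION & SPEC =====
-- Pre_ excludes exactly the inputs where A raises IndexError: issue_counts = [] (the unconditional
-- issue_counts[0]) and N > len(issue_counts) (issue_counts[hour] out of range inside the loop).
def Pre_overall_distortion (N : Int) (issue_counts : List (List Int)) : Prop :=
  issue_counts ≠ [] ∧ N ≤ issue_counts.length

instance (N : Int) (issue_counts : List (List Int)) : Decidable (Pre_overall_distortion N issue_counts) := by
  unfold Pre_overall_distortion; infer_instance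

def pvWitness_overall_distortion : Int × List (List Int) := (3, [[1, 2], [5], [0, 4]])

def Spec_overall_distortion (N : Int) (issue_counts : List (List Int)) (out : Int) : Prop :=
  out = overall_distortion_alt N issue_counts
instance (N : Int) (issue_counts : List (List Int)) (out : Int) : Decidable (Spec_overall_distortion N issue_counts out) := by
  unfold Spec_overall_distortion; infer_instance

-- ===== CLAIM (what is proved, stated in full; the proofs are below) =====
def Claim_equal_overall_distortion : Prop := ∀ (N : Int) (issue_counts : List (List Int)), Dom_overall_distortion N issue_counts → Pre_overall_distortion N issue_counts → Spec_overall_distortion N issue_counts (overall_distortion N issue_counts)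

-- ===== LEMMAS AND PROOFS =====

-- reference form: sum of the positive adjacent differences of cur :: l
def pvPairs (cur : Int) : List Int → Int
  | [] => 0
  | h :: t => max 0 (h - cur) + pvPairs h t

-- skipping a descending prefix does not change the sum (all its differences are ≤ 0)
theorem pvPairs_descend : ∀ (l : List Int) (cur : Int),
    pvPairs cur l = pvPairs (pvDescend cur l).1 (pvDescend cur l).2 := by
  intro l
  induction l with
  | nil => intro cur; simp [pvDescend]
  | cons h t ih =>
    intro cur
    by_cases hc : h ≤ cur
    · simp only [pvDescend, hc, if_true, pvPairs]
      rw [← ih h]; omega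
    · simp [pvDescend, hc]

-- an ascending run telescopes to peak − valley
theorem pvPairs_ascend : ∀ (l : List Int) (cur : Int),
    pvPairs cur l = ((pvAscend cur l).1 - cur) + pvPairs (pvAscend cur l).1 (pvAscend cur l).2 := by
  intro l
  induction l with
  | nil => intro cur; simp [pvAscend]
  | cons h t ih =>
    intro cur
    by_cases hc : cur ≤ h
    · simp only [pvAscend, hc, if_true, pvPairs]
      rw [ih h]; omega
    · simp [pvAscend, hc, pvPairs]

-- B's scan computes the sum of positive adjacent differences
theorem pvGo_eq_pairs (cur : Int) (l : List Int) : pvGo cur l = pvPairs cur l := by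
  induction cur, l using pvGo.induct with
  | case1 cur => simp [pvGo, pvPairs]
  | case2 cur h t d a ih =>
    rw [pvGo]
    show (a.1 - d.1) + pvGo a.1 a.2 = pvPairs cur (h :: t)
    simp only [d, a] at ih ⊢
    rw [ih]
    conv_rhs => rw [pvPairs_descend (h :: t) cur,
      pvPairs_ascend (pvDescend cur (h :: t)).2 (pvDescend cur (h :: t)).1]

-- A's loop over any list of hours, started at accumulator acc and previous total p, yields
-- acc plus the sum of the positive adjacent differences of p :: (totals of the hours).
theorem pv_fold_eq_pairs (f : Int → Int) (l : List Int) (acc p : Int) :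
    (l.foldl (fun (s : Int × Int) hour =>
        let curr := f hour
        (if curr > s.2 then s.1 + (curr - s.2) else s.1, curr)) (acc, p)).1
    = acc + pvPairs p (l.map f) := by
  induction l generalizing acc p with
  | nil => simp [pvPairs]
  | cons h t ih =>
    simp only [List.foldl_cons, List.map_cons, pvPairs]
    rw [ih]
    split_ifs with hc <;> omega

-- ===== VERDICT (by name: the statement is the Claim_ definition above) =====
theorem overall_distortion_spec : Claim_equal_overall_distortion := by
  intro N ic _ _
  unfold Spec_overall_distortion overall_distortion overall_distortion_alt
  by_cases h0 : 0 < N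
  · rw [PySem.List.pyRange_one_cons h0]
    simp only [List.map_cons]
    rw [pvGo_eq_pairs]
    have : (0 : Int) + 1 = 1 := by norm_num
    rw [this, pv_fold_eq_pairs]
    simp
  · rw [PySem.List.pyRange_one_eq_nil (by omega : N ≤ 0),
        PySem.List.pyRange_one_eq_nil (by omega : N ≤ 1)]
    simp
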